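-- pv_equiv track=rewrite | github.com/lee-b-23/CIS210 | Devel/FinalProject/Prod/threeFactors.py | threeFactors
-- ===== SOURCE A (Python) =====
-- def addPlaces(num):
--     result = 0
--     for x in range(0, len(str(num))):
--         if(str(num)[x] != "-"):                           #if num is negative
--             result = result + int(str(num)[x])
--         else:
--             pass
--     return(result)
--
-- def threeFactors(array):
--     resultsArray = []
--     factorsCounter = 0
--     for x in range(0, len(array)):
--         total = addPlaces(array[x])
--         while(len(str(total)) > 1):
--             total = addPlaces(total)
--
--         if(total == 3 or total == 6 or total == 9):
--             resultsArray.append(array[x])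
--             factorsCounter = factorsCounter + 1
--         else:
--             pass
--     return(resultsArray)
-- ===== SOURCE B (Python) =====
-- def threeFactors(array):
--     # digital root of n is 3, 6 or 9 exactly when n is a nonzero multiple of 3
--     return [n for n in array if n % 3 == 0 and n != 0]
-- ===== Notes on version B (the rewrite author's own statement) =====
-- stated objective: simpler
-- what changed: Replaces the per-element string digit-sum plus iterated digital-root while-loop with a single direct divisibility filter (n % 3 == 0 and n != 0), using the fact that the digital root is 3, 6 or 9 exactly for nonzero multiples of 3.
import Mathlib
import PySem

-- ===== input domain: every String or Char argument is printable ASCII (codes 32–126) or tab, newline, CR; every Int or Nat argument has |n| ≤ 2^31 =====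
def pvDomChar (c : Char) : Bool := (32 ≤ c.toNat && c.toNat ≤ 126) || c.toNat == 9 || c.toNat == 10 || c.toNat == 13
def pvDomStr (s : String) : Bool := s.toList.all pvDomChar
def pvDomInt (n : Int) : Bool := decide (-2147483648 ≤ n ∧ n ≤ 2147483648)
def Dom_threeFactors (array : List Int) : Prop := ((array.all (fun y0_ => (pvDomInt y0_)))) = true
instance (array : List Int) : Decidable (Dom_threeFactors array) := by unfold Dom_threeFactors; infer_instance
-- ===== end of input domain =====

-- B replaces A's string digit-sum + iterated digital-root while-loop by a direct
-- divisibility filter (n % 3 == 0 and n != 0); objective: simpler.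

-- ===== PORT A =====

-- int(str(num)[x]) for a single character: always a digit char at every call site,
-- so ofChars? is always `some` and the default 0 is never used
def pvCharInt (c : Char) : Int := (PySem.Int.ofChars? [c]).getD 0

-- addPlaces: loop over the characters of str(num), skipping '-', summing int(c)
def addPlaces (num : Int) : Int :=
  (PySem.Int.toChars num).foldl
    (fun result c => if c ≠ '-' then result + pvCharInt c else result) 0

-- termination measure for the while-loop (proved decreasing below, cited by name)
def pvMeasure (t : Int) : Nat := 2 * t.natAbs + (if t < 0 then 1 else 0)

-- bridge: Nat.toDigitsCore (the engine of str(n)) produces the reversed Nat.digits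
lemma pvToDigitsCore_eq (f : Nat) : ∀ (n : Nat) (l : List Char), 0 < n → n < 10 ^ f →
    Nat.toDigitsCore 10 f n l = ((Nat.digits 10 n).reverse.map Nat.digitChar) ++ l := by
  induction f with
  | zero => intro n l hn hf; omega
  | succ f ih =>
    intro n l hn hf
    rw [Nat.toDigitsCore]
    by_cases h0 : n / 10 = 0
    · have hlt : n < 10 := by omega
      simp [h0, Nat.digits_of_lt 10 n (by omega) hlt, Nat.mod_eq_of_lt hlt]
    · simp only [h0]
      rw [ih (n / 10) _ (by omega) (by omega),
        Nat.digits_def' (by norm_num : (1:Nat) < 10) hn]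
      simp

lemma pvToDigits_eq (n : Nat) (hn : 0 < n) :
    Nat.toDigits 10 n = (Nat.digits 10 n).reverse.map Nat.digitChar := by
  have h1 : n < 10 ^ (n + 1) := by
    calc n < 2 ^ n := Nat.lt_two_pow_self
    _ ≤ 10 ^ n := Nat.pow_le_pow_left (by norm_num) n
    _ ≤ 10 ^ (n + 1) := Nat.pow_le_pow_right (by norm_num) (by omega)
  simpa [Nat.toDigits] using pvToDigitsCore_eq (n + 1) n [] hn h1

lemma pvDigitChar_val (d : Nat) (h : d < 10) :
    Nat.digitChar d ≠ '-' ∧ pvCharInt (Nat.digitChar d) = (d : Int) := by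
  interval_cases d <;> exact ⟨by decide, by decide⟩

lemma pvFoldl_digits (L : List Nat) (h : ∀ d ∈ L, d < 10) : ∀ (r : Int),
    (L.map Nat.digitChar).foldl
      (fun result c => if c ≠ '-' then result + pvCharInt c else result) r
      = r + (L.sum : Int) := by
  induction L with
  | nil => intro r; simp
  | cons d L ih =>
    intro r
    obtain ⟨hne, hval⟩ := pvDigitChar_val d (h d (by simp))
    simp only [List.map_cons, List.foldl_cons, if_pos hne, hval]
    rw [ih (fun x hx => h x (by simp [hx]))]
    simp only [List.sum_cons]
    push_cast; ring

lemma addPlaces_eq (n : Int) : addPlaces n = ((Nat.digits 10 n.natAbs).sum : Int) := by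
  have hd : ∀ d ∈ (Nat.digits 10 n.natAbs).reverse, d < 10 := by
    intro d hd
    exact Nat.digits_lt_base (by norm_num) (List.mem_reverse.mp hd)
  rcases lt_trichotomy n 0 with hneg | hz | hpos
  · have hpos' : 0 < n.natAbs := by omega
    unfold addPlaces
    rw [show PySem.Int.toChars n = '-' :: Nat.toDigits 10 n.natAbs by
          simp [PySem.Int.toChars, hneg]]
    rw [pvToDigits_eq n.natAbs hpos']
    simp only [List.foldl_cons, if_neg (by decide : ¬('-' ≠ '-'))]
    rw [pvFoldl_digits _ hd 0]
    simp
  · subst hz; decide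
  · have hnn : ¬ n < 0 := by omega
    have htn : n.toNat = n.natAbs := by omega
    have hpos' : 0 < n.natAbs := by omega
    unfold addPlaces
    rw [show PySem.Int.toChars n = Nat.toDigits 10 n.natAbs by
          simp [PySem.Int.toChars, hnn, htn]]
    rw [pvToDigits_eq n.natAbs hpos', pvFoldl_digits _ hd 0]
    simp

lemma pvSum_digits_lt (m : Nat) (h : 10 ≤ m) : (Nat.digits 10 m).sum < m := by
  rw [Nat.digits_def' (by norm_num : (1:Nat) < 10) (by omega)]
  have h1 := Nat.digit_sum_le 10 (m / 10)
  have h2 := Nat.div_add_mod m 10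
  have h3 : m % 10 < 10 := Nat.mod_lt _ (by norm_num)
  simp only [List.sum_cons]
  omega

lemma pvLen_toChars_gt_one (t : Int) :
    1 < (PySem.Int.toChars t).length ↔ t < 0 ∨ 10 ≤ t := by
  rcases lt_trichotomy t 0 with hneg | hz | hpos
  · have hpos' : 0 < t.natAbs := by omega
    rw [show PySem.Int.toChars t = '-' :: Nat.toDigits 10 t.natAbs by
          simp [PySem.Int.toChars, hneg]]
    rw [pvToDigits_eq t.natAbs hpos']
    have : (Nat.digits 10 t.natAbs) ≠ [] := Nat.digits_ne_nil_iff_ne_zero.mpr (by omega)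
    constructor
    · intro _; exact Or.inl hneg
    · intro _
      simp only [List.length_cons, List.length_map, List.length_reverse]
      have := List.length_pos_iff.mpr this
      omega
  · subst hz; decide
  · have hnn : ¬ t < 0 := by omega
    have htn : t.toNat = t.natAbs := by omega
    rw [show PySem.Int.toChars t = Nat.toDigits 10 t.natAbs by
          simp [PySem.Int.toChars, hnn, htn]]
    rw [pvToDigits_eq t.natAbs (by omega)]
    simp only [List.length_map, List.length_reverse]
    rw [Nat.lt_digits_length_iff (by norm_num : (1:Nat) < 10)]
    omega

lemma pvMeasure_decreases (t : Int) (h : 1 < (PySem.Int.toChars t).length) :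
    pvMeasure (addPlaces t) < pvMeasure t := by
  rw [pvLen_toChars_gt_one] at h
  rw [addPlaces_eq]
  unfold pvMeasure
  rcases h with hneg | hten
  · have h1 := Nat.digit_sum_le 10 t.natAbs
    have h2 : ¬ ((Nat.digits 10 t.natAbs : List Nat).sum : Int) < 0 := not_lt.mpr (by positivity)
    simp only [if_pos hneg, if_neg h2, Int.natAbs_natCast]
    omega
  · have h1 := pvSum_digits_lt t.natAbs (by omega)
    have h2 : ¬ ((Nat.digits 10 t.natAbs : List Nat).sum : Int) < 0 := not_lt.mpr (by positivity)
    have h3 : ¬ t < 0 := by omega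
    simp only [if_neg h2, if_neg h3, Int.natAbs_natCast]
    omega

-- while(len(str(total)) > 1): total = addPlaces(total)
def reduceTotal (total : Int) : Int :=
  if h : 1 < (PySem.Int.toChars total).length then reduceTotal (addPlaces total) else total
termination_by pvMeasure total
decreasing_by exact pvMeasure_decreases total h

def threeFactors (array : List Int) : List Int :=
  (array.foldl
    (fun st a =>
      let total := addPlaces a
      let total := reduceTotal total
      if total = 3 ∨ total = 6 ∨ total = 9 then (st.1 ++ [a], st.2 + 1) else st)
    (([] : List Int), (0 : Int))).1

-- ===== PORT B =====
def threeFactors_alt (array : List Int) : List Int :=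
  array.filter (fun n => PySem.Int.mod n 3 == 0 && n != 0)

-- ===== PRECONDITION & SPEC =====
def Spec_threeFactors (array : List Int) (out : List Int) : Prop := out = threeFactors_alt array
instance (array : List Int) (out : List Int) : Decidable (Spec_threeFactors array out) := by unfold Spec_threeFactors; infer_instance

-- ===== CLAIM (what is proved, stated in full; the proofs are below) =====
def Claim_equal_threeFactors : Prop := ∀ (array : List Int), Dom_threeFactors array → Spec_threeFactors array (threeFactors array)

-- ===== LEMMAS AND PROOFS =====

lemma pvSum_digits_pos (m : Nat) (h : 0 < m) : 0 < (Nat.digits 10 m).sum := by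
  induction m using Nat.strong_induction_on with
  | _ m ih =>
    rw [Nat.digits_def' (by norm_num : (1:Nat) < 10) h]
    simp only [List.sum_cons]
    by_cases hm : m % 10 = 0
    · have hdiv : 0 < m / 10 := by omega
      have := ih (m / 10) (Nat.div_lt_self h (by norm_num)) hdiv
      omega
    · omega


lemma reduceTotal_inv (t : Int) (h : 0 ≤ t) :
    0 ≤ reduceTotal t ∧ reduceTotal t < 10 ∧
    (3 ∣ reduceTotal t ↔ 3 ∣ t) ∧ (reduceTotal t = 0 ↔ t = 0) := by
  fun_induction reduceTotal t with
  | case1 t hlen ih =>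
    have h10 : 10 ≤ t := by
      rcases (pvLen_toChars_gt_one t).mp hlen with h' | h' <;> omega
    have hap : addPlaces t = ((Nat.digits 10 t.natAbs).sum : Int) := addPlaces_eq t
    have hmod : (t.natAbs : Int) % 3 = ((Nat.digits 10 t.natAbs).sum : Int) % 3 := by
      have := Nat.modEq_three_digits_sum t.natAbs
      exact_mod_cast this
    have hpos := pvSum_digits_pos t.natAbs (by omega)
    obtain ⟨i1, i2, i3, i4⟩ := ih (by rw [hap]; positivity)
    refine ⟨i1, i2, ?_, ?_⟩
    · rw [i3, hap]
      have htabs : (t.natAbs : Int) = t := by omega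
      constructor <;> intro hd <;> [skip; skip] <;> omega
    · rw [i4, hap]; omega
  | case2 t hlen =>
    rw [pvLen_toChars_gt_one] at hlen
    push Not at hlen
    refine ⟨h, by omega, Iff.rfl, Iff.rfl⟩

lemma pvCond_iff (a : Int) :
    ((reduceTotal (addPlaces a) = 3 ∨ reduceTotal (addPlaces a) = 6 ∨
      reduceTotal (addPlaces a) = 9) ↔ (PySem.Int.mod a 3 == 0 && a != 0) = true) := by
  have hap : addPlaces a = ((Nat.digits 10 a.natAbs).sum : Int) := addPlaces_eq a
  have hnn : 0 ≤ addPlaces a := by rw [hap]; positivity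
  obtain ⟨i1, i2, i3, i4⟩ := reduceTotal_inv (addPlaces a) hnn
  have hs3 : 3 ∣ addPlaces a ↔ 3 ∣ a := by
    rw [hap]
    have hmod : (a.natAbs : Int) % 3 = ((Nat.digits 10 a.natAbs).sum : Int) % 3 := by
      have := Nat.modEq_three_digits_sum a.natAbs
      exact_mod_cast this
    constructor <;> intro hd <;> omega
  have hz : addPlaces a = 0 ↔ a = 0 := by
    rw [hap]
    constructor
    · intro h0
      by_contra hne
      have := pvSum_digits_pos a.natAbs (by omega)
      omega
    · intro h0; subst h0; decide
  have hmodz : PySem.Int.mod a 3 = 0 ↔ 3 ∣ a := PySem.Int.mod_eq_zero_iff_dvd a 3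
  simp only [Bool.and_eq_true, beq_iff_eq, bne_iff_ne, ne_eq]
  constructor
  · intro hr
    have hdvd : 3 ∣ reduceTotal (addPlaces a) := by rcases hr with h|h|h <;> omega
    have hrnz : reduceTotal (addPlaces a) ≠ 0 := by rcases hr with h|h|h <;> omega
    have : 3 ∣ addPlaces a := i3.mp hdvd
    refine ⟨hmodz.mpr (hs3.mp this), ?_⟩
    intro h0
    exact hrnz (i4.mpr (hz.mpr h0))
  · rintro ⟨hm, hne⟩
    have hdvd : 3 ∣ reduceTotal (addPlaces a) := i3.mpr (hs3.mpr (hmodz.mp hm))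
    have hrnz : reduceTotal (addPlaces a) ≠ 0 := fun h0 => hne (hz.mp (i4.mp h0))
    omega

lemma pvLoop_eq (l : List Int) : ∀ (acc : List Int) (k : Int),
    (l.foldl
      (fun st a =>
        let total := addPlaces a
        let total := reduceTotal total
        if total = 3 ∨ total = 6 ∨ total = 9 then (st.1 ++ [a], st.2 + 1) else st)
      (acc, k)).1 = acc ++ l.filter (fun n => PySem.Int.mod n 3 == 0 && n != 0) := by
  induction l with
  | nil => intro acc k; simp
  | cons a l ih =>
    intro acc k
    simp only [List.foldl_cons, List.filter_cons]
    by_cases hc : (reduceTotal (addPlaces a) = 3 ∨ reduceTotal (addPlaces a) = 6 ∨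
        reduceTotal (addPlaces a) = 9)
    · rw [if_pos hc, if_pos ((pvCond_iff a).mp hc), ih]
      simp
    · rw [if_neg hc, if_neg (fun h => hc ((pvCond_iff a).mpr h)), ih]

-- ===== VERDICT (by name: the statement is the Claim_ definition above) =====
theorem threeFactors_spec : Claim_equal_threeFactors := by
  intro array _
  unfold Spec_threeFactors threeFactors threeFactors_alt
  rw [pvLoop_eq array [] 0]
  simp
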